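-- pv_equiv track=rewrite | github.com/dollspace-gay/codeaudit | framework_detector.py | get_threat_models_for_frameworks
-- ===== SOURCE A (Python) =====
-- from typing import List, Dict, Set
--
-- def get_threat_models_for_frameworks(frameworks: List[str]) -> List[str]:
--     """
--     Determine applicable threat models based on detected frameworks.
--
--     Args:
--         frameworks: List of detected frameworks
--
--     Returns:
--         List of threat model names (e.g., ['web', 'api', 'database'])
--     """
--     threat_models: Set[str] = set()
--
--     web_frameworks = {'django', 'flask', 'fastapi', 'express', 'spring',
--                      'aspnet', 'rails', 'laravel', 'symfony', 'gin', 'echo'}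
--
--     mobile_frameworks = {'swiftui', 'uikit', 'android'}
--
--     database_frameworks = {'sqlalchemy', 'sequelize', 'hibernate',
--                           'entityframework', 'gorm', 'mongoose'}
--
--     frontend_frameworks = {'react', 'vue', 'angular'}
--
--     for framework in frameworks:
--         if framework in web_frameworks:
--             threat_models.add('web')
--             threat_models.add('api')
--
--         if framework in mobile_frameworks:
--             threat_models.add('mobile')
--
--         if framework in database_frameworks:
--             threat_models.add('database')
--
--         if framework in frontend_frameworks:
--             threat_models.add('web')
--
--     return sorted(list(threat_models))
-- ===== SOURCE B (Python) =====
-- from typing import List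
--
-- _WEB = {'django', 'flask', 'fastapi', 'express', 'spring',
--         'aspnet', 'rails', 'laravel', 'symfony', 'gin', 'echo'}
-- _MOBILE = {'swiftui', 'uikit', 'android'}
-- _DATABASE = {'sqlalchemy', 'sequelize', 'hibernate',
--              'entityframework', 'gorm', 'mongoose'}
-- _FRONTEND = {'react', 'vue', 'angular'}
--
-- # Categories in alphabetical order, each paired with the frameworks that trigger it.
-- _CHECKS = [('api', _WEB),
--            ('database', _DATABASE),
--            ('mobile', _MOBILE),
--            ('web', _WEB | _FRONTEND)]
--
-- def get_threat_models_for_frameworks(frameworks: List[str]) -> List[str]: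
--     # Iterate over categories, not frameworks: a category applies iff its
--     # trigger set meets the input.  The output is built directly in sorted
--     # order (the table is alphabetical), so no set and no sort are needed.
--     return [cat for cat, members in _CHECKS
--             if not members.isdisjoint(frameworks)]
-- ===== Notes on version B (the rewrite author's own statement) =====
-- stated objective: simpler
-- what changed: B inverts the iteration: instead of folding every framework into an accumulator set and sorting it, it walks a fixed alphabetical category table once and emits each category whose trigger set intersects the input, so the output is built directly in sorted order with no set accumulator and no sort.
import Mathlib
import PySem

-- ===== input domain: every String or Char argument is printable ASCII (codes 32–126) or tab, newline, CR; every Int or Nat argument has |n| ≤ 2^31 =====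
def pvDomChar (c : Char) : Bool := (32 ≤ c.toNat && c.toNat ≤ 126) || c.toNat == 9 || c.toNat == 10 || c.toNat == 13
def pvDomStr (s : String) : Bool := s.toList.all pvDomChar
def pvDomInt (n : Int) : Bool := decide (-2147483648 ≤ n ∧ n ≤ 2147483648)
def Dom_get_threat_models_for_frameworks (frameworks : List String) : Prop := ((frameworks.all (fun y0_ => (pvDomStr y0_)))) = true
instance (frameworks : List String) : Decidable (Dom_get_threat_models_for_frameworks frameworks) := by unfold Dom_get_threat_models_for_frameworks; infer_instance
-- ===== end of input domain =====

-- B inverts the iteration: instead of folding every input framework into an accumulator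
-- set and sorting it, it walks an alphabetical category table once and emits each
-- category whose trigger set meets the input (objective: simpler — no set accumulator, no sort).

-- ===== PORT A =====
def pvWebFrameworks : PySem.Set String :=
  PySem.Set.ofList ["django", "flask", "fastapi", "express", "spring",
                    "aspnet", "rails", "laravel", "symfony", "gin", "echo"]
def pvMobileFrameworks : PySem.Set String := PySem.Set.ofList ["swiftui", "uikit", "android"]
def pvDatabaseFrameworks : PySem.Set String :=
  PySem.Set.ofList ["sqlalchemy", "sequelize", "hibernate", "entityframework", "gorm", "mongoose"]
def pvFrontendFrameworks : PySem.Set String := PySem.Set.ofList ["react", "vue", "angular"]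

-- body of A's for-loop, one iteration (the four independent ifs, in order)
def pvStepA (tm : PySem.Set String) (framework : String) : PySem.Set String :=
  let tm := if PySem.Set.contains pvWebFrameworks framework then
              PySem.Set.add (PySem.Set.add tm "web") "api" else tm
  let tm := if PySem.Set.contains pvMobileFrameworks framework then
              PySem.Set.add tm "mobile" else tm
  let tm := if PySem.Set.contains pvDatabaseFrameworks framework then
              PySem.Set.add tm "database" else tm
  let tm := if PySem.Set.contains pvFrontendFrameworks framework then
              PySem.Set.add tm "web" else tm
  tm

def get_threat_models_for_frameworks (frameworks : List String) : List String :=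
  PySem.List.sorted (frameworks.foldl pvStepA PySem.Set.empty) (fun x => x) false

-- ===== PORT B =====
-- the alphabetical category table _CHECKS ('web' uses _WEB | _FRONTEND)
def pvChecks : List (String × PySem.Set String) :=
  [("api", pvWebFrameworks),
   ("database", pvDatabaseFrameworks),
   ("mobile", pvMobileFrameworks),
   ("web", PySem.Set.union pvWebFrameworks pvFrontendFrameworks)]

def get_threat_models_for_frameworks_alt (frameworks : List String) : List String :=
  (pvChecks.filter (fun p => !(PySem.Set.isdisjoint p.2 frameworks))).map Prod.fst

-- ===== PRECONDITION & SPEC =====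
def Spec_get_threat_models_for_frameworks (frameworks : List String) (out : List String) : Prop := out = get_threat_models_for_frameworks_alt frameworks
instance (frameworks : List String) (out : List String) : Decidable (Spec_get_threat_models_for_frameworks frameworks out) := by unfold Spec_get_threat_models_for_frameworks; infer_instance

-- ===== CLAIM (what is proved, stated in full; the proofs are below) =====
def Claim_equal_get_threat_models_for_frameworks : Prop := ∀ (frameworks : List String), Dom_get_threat_models_for_frameworks frameworks → Spec_get_threat_models_for_frameworks frameworks (get_threat_models_for_frameworks frameworks)

-- ===== LEMMAS AND PROOFS =====

-- one iteration of A's loop, as a membership fact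
lemma mem_pvStepA (s : PySem.Set String) (f x : String) :
    x ∈ pvStepA s f ↔ x ∈ s
      ∨ (x = "api" ∧ f ∈ pvWebFrameworks)
      ∨ (x = "database" ∧ f ∈ pvDatabaseFrameworks)
      ∨ (x = "mobile" ∧ f ∈ pvMobileFrameworks)
      ∨ (x = "web" ∧ (f ∈ pvWebFrameworks ∨ f ∈ pvFrontendFrameworks)) := by
  simp only [pvStepA]
  split_ifs with h1 h2 h3 h4 <;>
    simp_all [PySem.Set.mem_add] <;> tauto

-- membership in A's accumulator after the whole loop
lemma mem_foldA (fs : List String) : ∀ (s : PySem.Set String) (x : String),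
    x ∈ fs.foldl pvStepA s ↔ x ∈ s
      ∨ (x = "api" ∧ ∃ f ∈ fs, f ∈ pvWebFrameworks)
      ∨ (x = "database" ∧ ∃ f ∈ fs, f ∈ pvDatabaseFrameworks)
      ∨ (x = "mobile" ∧ ∃ f ∈ fs, f ∈ pvMobileFrameworks)
      ∨ (x = "web" ∧ ∃ f ∈ fs, f ∈ pvWebFrameworks ∨ f ∈ pvFrontendFrameworks) := by
  induction fs with
  | nil => simp
  | cons f fs ih =>
    intro s x
    simp only [List.foldl_cons, ih, mem_pvStepA, List.exists_mem_cons_iff]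
    constructor
    · rintro ((h | h | h | h | h) | h | h | h | h)
      · exact Or.inl h
      · exact Or.inr (Or.inl ⟨h.1, Or.inl h.2⟩)
      · exact Or.inr (Or.inr (Or.inl ⟨h.1, Or.inl h.2⟩))
      · exact Or.inr (Or.inr (Or.inr (Or.inl ⟨h.1, Or.inl h.2⟩)))
      · exact Or.inr (Or.inr (Or.inr (Or.inr ⟨h.1, Or.inl h.2⟩)))
      · exact Or.inr (Or.inl ⟨h.1, Or.inr h.2⟩)
      · exact Or.inr (Or.inr (Or.inl ⟨h.1, Or.inr h.2⟩))
      · exact Or.inr (Or.inr (Or.inr (Or.inl ⟨h.1, Or.inr h.2⟩)))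
      · exact Or.inr (Or.inr (Or.inr (Or.inr ⟨h.1, Or.inr h.2⟩)))
    · rintro (h | ⟨hx, h | h⟩ | ⟨hx, h | h⟩ | ⟨hx, h | h⟩ | ⟨hx, h | h⟩)
      · exact Or.inl (Or.inl h)
      · exact Or.inl (Or.inr (Or.inl ⟨hx, h⟩))
      · exact Or.inr (Or.inl ⟨hx, h⟩)
      · exact Or.inl (Or.inr (Or.inr (Or.inl ⟨hx, h⟩)))
      · exact Or.inr (Or.inr (Or.inl ⟨hx, h⟩))
      · exact Or.inl (Or.inr (Or.inr (Or.inr (Or.inl ⟨hx, h⟩))))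
      · exact Or.inr (Or.inr (Or.inr (Or.inl ⟨hx, h⟩)))
      · exact Or.inl (Or.inr (Or.inr (Or.inr (Or.inr ⟨hx, h⟩))))
      · exact Or.inr (Or.inr (Or.inr (Or.inr ⟨hx, h⟩)))

-- A's accumulator stays duplicate-free
lemma nodup_foldA (fs : List String) : ∀ (s : PySem.Set String), s.Nodup →
    (fs.foldl pvStepA s).Nodup := by
  induction fs with
  | nil => intro s hs; simpa using hs
  | cons f fs ih =>
    intro s hs
    refine ih _ ?_
    simp only [pvStepA]
    split_ifs
    all_goals (repeat apply PySem.Set.nodup_add); exact hs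

-- B's output is a sublist of the table's (strictly increasing) key column
lemma alt_sublist (fs : List String) :
    List.Sublist (get_threat_models_for_frameworks_alt fs) ["api", "database", "mobile", "web"] := by
  have h : List.Sublist ((pvChecks.filter (fun p => !(PySem.Set.isdisjoint p.2 fs))).map Prod.fst)
      (pvChecks.map Prod.fst) := List.Sublist.map _ List.filter_sublist
  simpa [get_threat_models_for_frameworks_alt, pvChecks] using h

-- membership in B's output
lemma mem_alt (fs : List String) (x : String) :
    x ∈ get_threat_models_for_frameworks_alt fs ↔
      (x = "api" ∧ ∃ f ∈ fs, f ∈ pvWebFrameworks)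
      ∨ (x = "database" ∧ ∃ f ∈ fs, f ∈ pvDatabaseFrameworks)
      ∨ (x = "mobile" ∧ ∃ f ∈ fs, f ∈ pvMobileFrameworks)
      ∨ (x = "web" ∧ ∃ f ∈ fs, f ∈ pvWebFrameworks ∨ f ∈ pvFrontendFrameworks) := by
  have hdis : ∀ (s : PySem.Set String),
      ((!PySem.Set.isdisjoint s fs) = true) ↔ ∃ f ∈ fs, f ∈ s := by
    intro s
    rw [Bool.not_eq_true', ← Bool.not_eq_true, PySem.Set.isdisjoint_iff]
    push Not
    exact ⟨fun ⟨y, hy, hyt⟩ => ⟨y, hyt, hy⟩, fun ⟨y, hy, hyt⟩ => ⟨y, hyt, hy⟩⟩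
  simp only [get_threat_models_for_frameworks_alt, List.mem_map, List.mem_filter]
  constructor
  · rintro ⟨p, ⟨hp, hd⟩, rfl⟩
    have hp' : p = ("api", pvWebFrameworks) ∨ p = ("database", pvDatabaseFrameworks)
        ∨ p = ("mobile", pvMobileFrameworks)
        ∨ p = ("web", PySem.Set.union pvWebFrameworks pvFrontendFrameworks) := by
      simpa [pvChecks] using hp
    rcases hp' with rfl | rfl | rfl | rfl
    · exact Or.inl ⟨rfl, (hdis _).mp hd⟩
    · exact Or.inr (Or.inl ⟨rfl, (hdis _).mp hd⟩)
    · exact Or.inr (Or.inr (Or.inl ⟨rfl, (hdis _).mp hd⟩))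
    · refine Or.inr (Or.inr (Or.inr ⟨rfl, ?_⟩))
      obtain ⟨f, hf, hm⟩ := (hdis _).mp hd
      exact ⟨f, hf, by simpa [PySem.Set.mem_union] using hm⟩
  · rintro (⟨rfl, hex⟩ | ⟨rfl, hex⟩ | ⟨rfl, hex⟩ | ⟨rfl, hex⟩)
    · exact ⟨("api", pvWebFrameworks), ⟨by simp [pvChecks], (hdis _).mpr hex⟩, rfl⟩
    · exact ⟨("database", pvDatabaseFrameworks), ⟨by simp [pvChecks], (hdis _).mpr hex⟩, rfl⟩
    · exact ⟨("mobile", pvMobileFrameworks), ⟨by simp [pvChecks], (hdis _).mpr hex⟩, rfl⟩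
    · refine ⟨("web", PySem.Set.union pvWebFrameworks pvFrontendFrameworks),
        ⟨by simp [pvChecks], (hdis _).mpr ?_⟩, rfl⟩
      obtain ⟨f, hf, hm⟩ := hex
      exact ⟨f, hf, by simpa [PySem.Set.mem_union] using hm⟩

-- ===== VERDICT (by name: the statement is the Claim_ definition above) =====
theorem get_threat_models_for_frameworks_spec : Claim_equal_get_threat_models_for_frameworks := by
  intro fs _
  unfold Spec_get_threat_models_for_frameworks get_threat_models_for_frameworks
  have hnodupA : (fs.foldl pvStepA PySem.Set.empty).Nodup :=
    nodup_foldA fs _ (by simp [PySem.Set.empty])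
  have hnodupB : (get_threat_models_for_frameworks_alt fs).Nodup :=
    List.Nodup.sublist (alt_sublist fs) (by decide)
  have hperm : (get_threat_models_for_frameworks_alt fs).Perm (fs.foldl pvStepA PySem.Set.empty) := by
    rw [List.perm_ext_iff_of_nodup hnodupB hnodupA]
    intro x
    rw [mem_alt, mem_foldA]
    simp [PySem.Set.empty]
  have hpair : (get_threat_models_for_frameworks_alt fs).Pairwise (fun a b : String => a < b) :=
    List.Pairwise.sublist (alt_sublist fs) (by simp [List.pairwise_cons]; decide)
  exact PySem.List.sorted_eq_of_perm_of_pairwise_lt _ _ _ hperm hpair
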